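-- pv_equiv track=rewrite | github.com/yani-rivera/UrbanGrowthSDG11 | real_estate_parser/modules/archives/SplitByCuev4.py | _first_dot_pair
-- ===== SOURCE A (Python) =====
-- from typing import List, Optional, Tuple
--
-- _ABBR_LEFT = {"col", "res", "bo"}
--
-- def _first_dot_pair(line: str, maxpos: int) -> Optional[Tuple[str, str]]:
--     s = line.strip()
--     limit = min(len(s), maxpos)
--     i = 0
--     while i < limit:
--         ch = s[i]
--         if ch == '.':
--             # ellipses "..."
--             if i+2 < len(s) and s[i+1] == '.' and s[i+2] == '.':
--                 i += 3
--                 continue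
--             # decimals: digit '.' digit
--             if i-1 >= 0 and i+1 < len(s) and s[i-1].isdigit() and s[i+1].isdigit():
--                 i += 1
--                 continue
--             # skip abbreviations like 'COL.' 'RES.' 'BO.'
--             j = i-1
--             while j >= 0 and s[j].isspace():
--                 j -= 1
--             k = j
--             while k >= 0 and s[k].isalpha():
--                 k -= 1
--             token_left = s[k+1:j+1].lower()
--             if token_left in _ABBR_LEFT:
--                 i += 1
--                 continue
--             # valid cue
--             return (s[:i], s[i+1:])
--         i += 1
--     return None
-- ===== SOURCE B (Python) =====
-- _ABBR_LEFT = {"col", "res", "bo"}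
--
-- def _first_dot_pair(line, maxpos):
--     # One forward pass: maintain the alphabetic word preceding the cursor
--     # (across whitespace-only gaps) instead of scanning backwards at each dot.
--     s = line.strip()
--     n = len(s)
--     limit = min(n, maxpos)
--     word = []      # chars of the most recent maximal alphabetic run, still "visible" through spaces
--     in_run = False  # previous character extended that run
--     i = 0
--     while i < limit:
--         ch = s[i]
--         if ch == '.':
--             if i + 2 < n and s[i+1] == '.' and s[i+2] == '.':
--                 word, in_run = [], False   # three dots consumed: word resets
--                 i += 3
--                 continue
--             if i >= 1 and i + 1 < n and s[i-1].isdigit() and s[i+1].isdigit():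
--                 word, in_run = [], False
--                 i += 1
--                 continue
--             if ''.join(word).lower() in _ABBR_LEFT:
--                 word, in_run = [], False
--                 i += 1
--                 continue
--             return (s[:i], s[i+1:])
--         if ch.isalpha():
--             if in_run:
--                 word.append(ch)
--             else:
--                 word = [ch]
--             in_run = True
--         elif ch.isspace():
--             in_run = False
--         else:
--             word, in_run = [], False
--         i += 1
--     return None
-- ===== Notes on version B (the rewrite author's own statement) =====
-- stated objective: alternative
-- what changed: B replaces A's per-dot backward scans (skip whitespace, then collect the alphabetic run) with a single forward pass that maintains the preceding word and an in-run flag as state, so the inner backward loops disappear.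
import Mathlib
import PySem

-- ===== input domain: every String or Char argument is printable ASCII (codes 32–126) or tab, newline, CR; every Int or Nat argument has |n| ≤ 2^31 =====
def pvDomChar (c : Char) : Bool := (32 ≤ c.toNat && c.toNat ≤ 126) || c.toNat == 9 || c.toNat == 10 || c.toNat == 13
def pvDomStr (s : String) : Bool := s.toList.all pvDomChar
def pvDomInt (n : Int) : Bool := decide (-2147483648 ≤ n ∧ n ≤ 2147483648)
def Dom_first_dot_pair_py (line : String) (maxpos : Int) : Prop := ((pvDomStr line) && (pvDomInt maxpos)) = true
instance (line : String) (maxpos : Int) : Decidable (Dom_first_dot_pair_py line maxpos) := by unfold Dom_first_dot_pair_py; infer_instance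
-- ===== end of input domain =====

-- B is one forward pass maintaining the preceding word as state, instead of A's
-- backward inner scans at each dot (objective: alternative decomposition).

-- ===== PORT A =====
-- j/k run downward in A; we carry them as position+1 (jp = j+1), so jp = 0 means j = -1.
def pvSkipSpace (cs : List Char) : Nat → Nat
  | 0 => 0
  | jp+1 => if PySem.Chars.isspace (cs.getD jp ' ') then pvSkipSpace cs jp else jp+1

def pvSkipAlpha (cs : List Char) : Nat → Nat
  | 0 => 0
  | kp+1 => if PySem.Chars.isalpha (cs.getD kp ' ') then pvSkipAlpha cs kp else kp+1

-- A's backward scans at a dot: skip whitespace (j), then the alphabetic run (k), take s[k+1:j+1]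
def pvTokenLeft (cs : List Char) (i : Nat) : List Char :=
  let jp := pvSkipSpace cs i
  let kp := pvSkipAlpha cs jp
  (cs.drop kp).take (jp - kp)

def pvAbbr (token : List Char) : Bool :=
  token = "col".toList || token = "res".toList || token = "bo".toList

-- A's while loop; i runs over Nat (i starts at 0 and only grows, a negative
-- limit simply means zero iterations, as in Python).
def pvALoop (cs : List Char) (limit : Nat) (i : Nat) : Option (List Char × List Char) :=
  if _h : i < limit then
    let ch := cs.getD i ' '
    if ch = '.' then
      if i+2 < cs.length ∧ cs.getD (i+1) ' ' = '.' ∧ cs.getD (i+2) ' ' = '.' then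
        pvALoop cs limit (i+3)
      else if 1 ≤ i ∧ i+1 < cs.length ∧ PySem.Chars.isdigit (cs.getD (i-1) ' ') = true
              ∧ PySem.Chars.isdigit (cs.getD (i+1) ' ') = true then
        pvALoop cs limit (i+1)
      else
        let token := (pvTokenLeft cs i).map PySem.Chars.lowerChar
        if pvAbbr token then pvALoop cs limit (i+1)
        else some (cs.take i, cs.drop (i+1))
    else pvALoop cs limit (i+1)
  else none
  termination_by limit - i
  decreasing_by all_goals omega

def first_dot_pair_py (line : String) (maxpos : Int) : Option (String × String) :=
  let cs := (PySem.Str.strip line).toList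
  let limit := (min (cs.length : Int) maxpos).toNat
  match pvALoop cs limit 0 with
  | some (a, b) => some (String.ofList a, String.ofList b)
  | none => none

-- ===== PORT B =====
-- B's forward pass: word = preceding alphabetic run (kept across whitespace),
-- inRun = previous char extended it.
def pvBLoop (cs : List Char) (limit : Nat) (i : Nat) (word : List Char) (inRun : Bool) :
    Option (List Char × List Char) :=
  if _h : i < limit then
    let ch := cs.getD i ' '
    if ch = '.' then
      if i+2 < cs.length ∧ cs.getD (i+1) ' ' = '.' ∧ cs.getD (i+2) ' ' = '.' then
        pvBLoop cs limit (i+3) [] false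
      else if 1 ≤ i ∧ i+1 < cs.length ∧ PySem.Chars.isdigit (cs.getD (i-1) ' ') = true
              ∧ PySem.Chars.isdigit (cs.getD (i+1) ' ') = true then
        pvBLoop cs limit (i+1) [] false
      else if pvAbbr (word.map PySem.Chars.lowerChar) then
        pvBLoop cs limit (i+1) [] false
      else some (cs.take i, cs.drop (i+1))
    else if PySem.Chars.isalpha ch then
      pvBLoop cs limit (i+1) (if inRun then word ++ [ch] else [ch]) true
    else if PySem.Chars.isspace ch then
      pvBLoop cs limit (i+1) word false
    else
      pvBLoop cs limit (i+1) [] false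
  else none
  termination_by limit - i
  decreasing_by all_goals omega

def first_dot_pair_py_alt (line : String) (maxpos : Int) : Option (String × String) :=
  let cs := (PySem.Str.strip line).toList
  let limit := (min (cs.length : Int) maxpos).toNat
  match pvBLoop cs limit 0 [] false with
  | some (a, b) => some (String.ofList a, String.ofList b)
  | none => none

-- ===== PRECONDITION & SPEC =====
def Spec_first_dot_pair_py (line : String) (maxpos : Int) (out : Option (String × String)) : Prop := out = first_dot_pair_py_alt line maxpos
instance (line : String) (maxpos : Int) (out : Option (String × String)) : Decidable (Spec_first_dot_pair_py line maxpos out) := by unfold Spec_first_dot_pair_py; infer_instance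

-- ===== CLAIM (what is proved, stated in full; the proofs are below) =====
def Claim_equal_first_dot_pair_py : Prop := ∀ (line : String) (maxpos : Int), Dom_first_dot_pair_py line maxpos → Spec_first_dot_pair_py line maxpos (first_dot_pair_py line maxpos)

-- ===== LEMMAS AND PROOFS =====
-- the word A's backward scans would find at position i, and the "previous char was alphabetic" flag
def pvW (cs : List Char) (i : Nat) : List Char := pvTokenLeft cs i

def pvR (cs : List Char) (i : Nat) : Bool :=
  decide (1 <= i) && PySem.Chars.isalpha (cs.getD (i-1) ' ')

theorem pvSkipAlpha_le (cs : List Char) (kp : Nat) : pvSkipAlpha cs kp <= kp := by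
  induction kp with
  | zero => simp [pvSkipAlpha]
  | succ n ih => simp only [pvSkipAlpha]; split <;> omega

theorem pvSkipSpace_succ (cs : List Char) (i : Nat) :
    pvSkipSpace cs (i+1) = if PySem.Chars.isspace (cs.getD i ' ') then pvSkipSpace cs i else i+1 := rfl

theorem pvSkipAlpha_succ (cs : List Char) (i : Nat) :
    pvSkipAlpha cs (i+1) = if PySem.Chars.isalpha (cs.getD i ' ') then pvSkipAlpha cs i else i+1 := rfl

theorem pv_alpha_not_space (c : Char) (h : PySem.Chars.isalpha c = true) :
    PySem.Chars.isspace c = false := by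
  have hb : 65 <= c.toNat ∧ c.toNat <= 90 ∨ 97 <= c.toNat ∧ c.toNat <= 122 := by
    unfold PySem.Chars.isalpha PySem.Chars.isupper PySem.Chars.islower at h
    simp only [Bool.or_eq_true, Bool.and_eq_true, decide_eq_true_eq, Char.le_def,
      UInt32.le_iff_toNat_le, Char.reduceVal, UInt32.reduceToNat, Char.toNat_val] at h
    exact h
  unfold PySem.Chars.isspace
  simp only [Bool.or_eq_false_iff, Bool.and_eq_false_iff, decide_eq_false_iff_not]
  omega

theorem pvW_space (cs : List Char) (i : Nat)
    (h : PySem.Chars.isspace (cs.getD i ' ') = true) :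
    pvW cs (i+1) = pvW cs i := by
  simp only [pvW, pvTokenLeft, pvSkipSpace_succ, h, if_true]

theorem pvW_other (cs : List Char) (i : Nat)
    (ha : PySem.Chars.isalpha (cs.getD i ' ') = false)
    (hs : PySem.Chars.isspace (cs.getD i ' ') = false) :
    pvW cs (i+1) = [] := by
  have h1 : pvSkipSpace cs (i+1) = i+1 := by rw [pvSkipSpace_succ, if_neg (by rw [hs]; simp)]
  have h2 : pvSkipAlpha cs (i+1) = i+1 := by rw [pvSkipAlpha_succ, if_neg (by rw [ha]; simp)]
  simp [pvW, pvTokenLeft, h1, h2]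

theorem pvR_succ (cs : List Char) (i : Nat) :
    pvR cs (i+1) = PySem.Chars.isalpha (cs.getD i ' ') := by
  simp [pvR]

theorem pvW_alpha (cs : List Char) (i : Nat) (hi : i < cs.length)
    (h : PySem.Chars.isalpha (cs.getD i ' ') = true) :
    pvW cs (i+1) = if pvR cs i then pvW cs i ++ [cs.getD i ' '] else [cs.getD i ' '] := by
  have hs := pv_alpha_not_space _ h
  have hget : cs.getD i ' ' = cs[i] := by
    simp [List.getD, List.getElem?_eq_getElem hi]
  have hjp : pvSkipSpace cs (i+1) = i+1 := by
    rw [pvSkipSpace_succ, if_neg (by rw [hs]; simp)]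
  have hka : pvSkipAlpha cs (i+1) = pvSkipAlpha cs i := by
    rw [pvSkipAlpha_succ, if_pos h]
  by_cases hr : pvR cs i = true
  · -- previous char alphabetic: the run extends
    obtain ⟨hi1, hpa⟩ : 1 <= i ∧ PySem.Chars.isalpha (cs.getD (i-1) ' ') = true := by
      simpa [pvR] using hr
    obtain ⟨m, rfl⟩ : ∃ m, i = m + 1 := ⟨i - 1, by omega⟩
    have hm : (m + 1) - 1 = m := by omega
    rw [hm] at hpa
    have hps : pvSkipSpace cs (m+1) = m+1 := by
      rw [pvSkipSpace_succ, if_neg (by rw [pv_alpha_not_space _ hpa]; simp)]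
    have hkp : pvSkipAlpha cs (m+1) <= m+1 := pvSkipAlpha_le cs (m+1)
    rw [if_pos hr]
    simp only [pvW, pvTokenLeft, hjp, hka, hps]
    set kp := pvSkipAlpha cs (m+1) with hk
    have h1 : (m+1+1) - kp = ((m+1) - kp) + 1 := by omega
    rw [h1, List.take_add_one]
    have h2 : (cs.drop kp)[(m+1) - kp]? = some cs[m+1] := by
      rw [List.getElem?_drop]
      rw [show kp + ((m+1) - kp) = m+1 by omega]
      exact List.getElem?_eq_getElem hi
    rw [h2, hget]
    rfl
  · -- fresh run of length one
    have hka0 : pvSkipAlpha cs i = i := by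
      match i, hr with
      | 0, _ => rfl
      | m+1, hr =>
        have hpa : PySem.Chars.isalpha (cs.getD m ' ') = false := by
          simp [pvR] at hr
          simpa [List.getD] using hr
        rw [pvSkipAlpha_succ, if_neg (by rw [hpa]; simp)]
    rw [if_neg hr]
    simp only [pvW, pvTokenLeft, hjp, hka, hka0]
    rw [show (i+1) - i = 1 by omega]
    rw [List.drop_eq_getElem_cons hi]
    simp only [List.take_succ_cons, List.take_zero, hget]

theorem pvDotFacts : PySem.Chars.isalpha '.' = false ∧ PySem.Chars.isspace '.' = false := by decide

theorem pvLoop_eq (cs : List Char) (limit : Nat) (hl : limit <= cs.length) :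
    ∀ f i, limit - i <= f → pvALoop cs limit i = pvBLoop cs limit i (pvW cs i) (pvR cs i) := by
  intro f
  induction f with
  | zero =>
    intro i hf
    have h : ¬ i < limit := by omega
    rw [pvALoop, pvBLoop]
    simp only [dif_neg h]
  | succ f ih =>
    intro i hf
    by_cases h : i < limit
    · have hi : i < cs.length := by omega
      rw [pvALoop, pvBLoop]
      simp only [dif_pos h]
      by_cases hdot : cs.getD i ' ' = '.'
      · simp only [hdot, if_true]
        by_cases he : i+2 < cs.length ∧ cs.getD (i+1) ' ' = '.' ∧ cs.getD (i+2) ' ' = '.'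
        · simp only [if_pos he]
          have w1 : pvW cs (i+1) = [] := pvW_other cs i (hdot ▸ pvDotFacts.1) (hdot ▸ pvDotFacts.2)
          have w3 : pvW cs (i+3) = [] := by
            rw [show i+3 = (i+2)+1 by omega]
            exact pvW_other cs (i+2) (he.2.2 ▸ pvDotFacts.1) (he.2.2 ▸ pvDotFacts.2)
          have r3 : pvR cs (i+3) = false := by
            rw [show i+3 = (i+2)+1 by omega, pvR_succ, he.2.2]
            exact pvDotFacts.1
          rw [ih (i+3) (by omega), w3, r3]
        · simp only [if_neg he]
          have w1 : pvW cs (i+1) = [] := pvW_other cs i (hdot ▸ pvDotFacts.1) (hdot ▸ pvDotFacts.2)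
          have r1 : pvR cs (i+1) = false := by rw [pvR_succ, hdot]; exact pvDotFacts.1
          by_cases hd : 1 <= i ∧ i+1 < cs.length ∧ PySem.Chars.isdigit (cs.getD (i-1) ' ') = true
              ∧ PySem.Chars.isdigit (cs.getD (i+1) ' ') = true
          · simp only [if_pos hd]
            rw [ih (i+1) (by omega), w1, r1]
          · simp only [if_neg hd]
            simp only [pvW]
            by_cases hab : pvAbbr ((pvTokenLeft cs i).map PySem.Chars.lowerChar) = true
            · simp only [if_pos hab]
              rw [ih (i+1) (by omega), w1, r1]
            · simp only [if_neg hab]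
      · simp only [if_neg hdot]
        by_cases ha : PySem.Chars.isalpha (cs.getD i ' ') = true
        · rw [if_pos ha]
          rw [ih (i+1) (by omega), pvW_alpha cs i hi ha,
              show pvR cs (i+1) = true from by rw [pvR_succ]; exact ha]
        · rw [if_neg ha]
          by_cases hsp : PySem.Chars.isspace (cs.getD i ' ') = true
          · rw [if_pos hsp]
            rw [← pvW_space cs i hsp]
            have : pvR cs (i+1) = false := by
              rw [pvR_succ]; revert ha; cases PySem.Chars.isalpha (cs.getD i ' ') <;> simp
            rw [← this]
            exact ih (i+1) (by omega)
          · rw [if_neg hsp]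
            have ha' : PySem.Chars.isalpha (cs.getD i ' ') = false := by
              revert ha; cases PySem.Chars.isalpha (cs.getD i ' ') <;> simp
            have hs' : PySem.Chars.isspace (cs.getD i ' ') = false := by
              revert hsp; cases PySem.Chars.isspace (cs.getD i ' ') <;> simp
            rw [← pvW_other cs i ha' hs']
            have : pvR cs (i+1) = false := by rw [pvR_succ]; exact ha'
            rw [← this]
            exact ih (i+1) (by omega)
    · rw [pvALoop, pvBLoop]
      simp only [dif_neg h]

-- ===== VERDICT (by name: the statement is the Claim_ definition above) =====
theorem first_dot_pair_py_spec : Claim_equal_first_dot_pair_py := by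
  intro line maxpos _
  unfold Spec_first_dot_pair_py
  simp only [first_dot_pair_py, first_dot_pair_py_alt]
  have hl : ((min (((PySem.Str.strip line).toList.length : Int)) maxpos).toNat)
      <= (PySem.Str.strip line).toList.length := by omega
  have h := pvLoop_eq ((PySem.Str.strip line).toList)
      ((min (((PySem.Str.strip line).toList.length : Int)) maxpos).toNat) hl
      ((min (((PySem.Str.strip line).toList.length : Int)) maxpos).toNat) 0 (by omega)
  have h0 : pvW ((PySem.Str.strip line).toList) 0 = [] := rfl
  have h1 : pvR ((PySem.Str.strip line).toList) 0 = false := rfl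
  rw [h0, h1] at h
  rw [h]
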